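-- pv_equiv track=rewrite | github.com/GaryBall/COMP_project | fileIO.py | add_to_100
-- ===== SOURCE A (Python) =====
-- def add_to_100(number_list):
--     """
--     Check if the votes from members adds up to 100.
--     @type number_list: list
--     @param number_list:
--     @return: The result of the checking
--     """
--     count = 0
--     for number in number_list:
--         if number >= 0:
--             count += number
--         else:
--             return 0
--
--     if count == 100:
--         return 1
--     else:
--         return 0
-- ===== SOURCE B (Python) =====
-- def add_to_100(number_list):
--     s = sorted(number_list)
--     if s and s[0] < 0:
--         return 0
--     return 1 if sum(s) == 100 else 0
-- ===== Notes on version B (the rewrite author's own statement) =====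
-- stated objective: alternative
-- what changed: Sorts the list first so the negativity test becomes a single inspection of the smallest (first) element of the sorted copy, then compares the sum of the sorted copy to 100, instead of A's single guarded accumulating pass with an early return.
import Mathlib
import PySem

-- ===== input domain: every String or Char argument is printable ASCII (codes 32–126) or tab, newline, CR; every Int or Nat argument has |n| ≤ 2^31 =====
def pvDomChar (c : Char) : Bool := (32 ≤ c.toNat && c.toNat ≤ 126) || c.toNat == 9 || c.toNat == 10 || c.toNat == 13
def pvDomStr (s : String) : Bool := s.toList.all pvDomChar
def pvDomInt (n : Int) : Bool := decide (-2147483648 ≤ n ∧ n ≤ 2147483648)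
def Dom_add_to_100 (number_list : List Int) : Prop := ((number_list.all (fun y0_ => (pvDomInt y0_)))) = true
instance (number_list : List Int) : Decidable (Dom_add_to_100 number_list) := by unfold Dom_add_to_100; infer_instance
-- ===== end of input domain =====

-- B sorts the list first, so "some vote is negative" becomes "the first element of the
-- sorted copy is negative", then compares the sum of the sorted copy to 100; objective: alternative.

-- ===== PORT A =====
-- loop with accumulator `count`; early return 0 on a negative element
def add_to_100_loop (count : Int) : List Int → Int
  | [] => if count = 100 then 1 else 0
  | number :: rest =>
      if number ≥ 0 then add_to_100_loop (count + number) rest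
      else 0

def add_to_100 (number_list : List Int) : Int :=
  add_to_100_loop 0 number_list

-- ===== PORT B =====
-- s = sorted(number_list); if s and s[0] < 0: return 0; return 1 if sum(s) == 100 else 0
def add_to_100_alt (number_list : List Int) : Int :=
  let s := PySem.List.sorted number_list (fun x => x) false
  match s with
  | m :: _ => if m < 0 then 0 else if s.sum = 100 then 1 else 0
  | [] => if s.sum = 100 then 1 else 0

-- ===== PRECONDITION & SPEC =====
def Spec_add_to_100 (number_list : List Int) (out : Int) : Prop := out = add_to_100_alt number_list
instance (number_list : List Int) (out : Int) : Decidable (Spec_add_to_100 number_list out) := by unfold Spec_add_to_100; infer_instance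

-- ===== CLAIM =====
def Claim_equal_add_to_100 : Prop := ∀ (number_list : List Int), Dom_add_to_100 number_list → Spec_add_to_100 number_list (add_to_100 number_list)

-- ===== LEMMAS AND PROOFS =====
-- A's loop computes: 1 iff all elements nonnegative and count + sum = 100
theorem add_to_100_loop_eq (xs : List Int) (count : Int) :
    add_to_100_loop count xs =
      (if (∀ x ∈ xs, 0 ≤ x) ∧ count + xs.sum = 100 then 1 else 0) := by
  induction xs generalizing count with
  | nil => simp [add_to_100_loop]
  | cons x rest ih =>
      simp only [add_to_100_loop, List.sum_cons]
      by_cases hx : x ≥ 0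
      · rw [if_pos hx, ih]
        have : count + x + rest.sum = count + (x + rest.sum) := by ring
        rw [this]
        by_cases h : (∀ y ∈ rest, 0 ≤ y) ∧ count + (x + rest.sum) = 100
        · rw [if_pos h, if_pos]
          exact ⟨fun y hy => (List.mem_cons.mp hy).elim (fun h' => h' ▸ hx) (h.1 y), h.2⟩
        · rw [if_neg h, if_neg]
          intro ⟨h1, h2⟩
          exact h ⟨fun y hy => h1 y (List.mem_cons_of_mem _ hy), h2⟩
      · rw [if_neg hx, if_neg]
        intro ⟨h1, _⟩
        exact hx (h1 x (List.mem_cons_self ..))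

-- ===== VERDICT =====
theorem add_to_100_spec : Claim_equal_add_to_100 := by
  intro xs _
  unfold Spec_add_to_100 add_to_100 add_to_100_alt
  rw [add_to_100_loop_eq]
  have hperm : (PySem.List.sorted xs (fun x => x) false).Perm xs := PySem.List.sorted_perm ..
  have hsum : (PySem.List.sorted xs (fun x => x) false).sum = xs.sum := hperm.sum_eq
  cases hs : PySem.List.sorted xs (fun x => x) false with
  | nil =>
      have hxs : xs = [] := by
        have := hperm; rw [hs] at this; exact this.symm.eq_nil
      subst hxs
      simp
  | cons m t =>
      simp only []
      by_cases hm : m < 0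
      · rw [if_pos hm]
        have hmem : m ∈ xs := hperm.mem_iff.mp (hs ▸ List.mem_cons_self ..)
        rw [if_neg]
        intro ⟨h1, _⟩
        exact absurd (h1 m hmem) (by omega)
      · rw [if_neg hm]
        have hall : ∀ x ∈ xs, 0 ≤ x := by
          intro y hy
          have := PySem.List.key_head_sorted_le (xs := xs) (key := fun x => x) hs y hy
          simp at this; omega
        rw [hs] at hsum
        rw [hsum, zero_add]
        by_cases hv : xs.sum = 100
        · rw [if_pos hv, if_pos ⟨hall, hv⟩]
        · rw [if_neg hv, if_neg (fun h => hv h.2)]
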